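-- pv_equiv track=rewrite | github.com/whymad/FailClosedDotCode-encode-decode- | FCDDecoder.py | make_interleaver
-- ===== SOURCE A (Python) =====
-- from typing import List, Tuple, Optional, Dict, Any
--
-- def make_interleaver(step: int = 37, n: int = 121) -> List[int]:
--     """
--     The encoder uses:
--         physical_index = P[logical_index] = (logical_index * step) % n
--
--     This function returns P.
--     Decoder recovers logical bits via:
--         logical[logical_index] = physical[P[logical_index]]
--     (i.e., gather back from physical positions in the same order).
--     """
--     def gcd(a: int, b: int) -> int:
--         while b:
--             a, b = b, a % b
--         return a
--
--     if gcd(step, n) != 1: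
--         raise ValueError(f"Interleave step={step} must be coprime with n={n}")
--     return [(i * step) % n for i in range(n)]
-- ===== SOURCE B (Python) =====
-- from typing import List
--
-- def make_interleaver(step: int = 37, n: int = 121) -> List[int]:
--     def gcd(a: int, b: int) -> int:
--         while b:
--             a, b = b, a % b
--         return a
--
--     if gcd(step, n) != 1:
--         raise ValueError(f"Interleave step={step} must be coprime with n={n}")
--     result = []
--     acc = 0
--     for _ in range(n):
--         result.append(acc)
--         acc = (acc + step) % n
--     return result
-- ===== Notes on version B (the rewrite author's own statement) =====
-- stated objective: alternative
-- what changed: Replaces the comprehension's per-element multiplication (i*step)%n with an explicit loop threading a running accumulator updated by incremental modular addition acc=(acc+step)%n.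
import Mathlib
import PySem

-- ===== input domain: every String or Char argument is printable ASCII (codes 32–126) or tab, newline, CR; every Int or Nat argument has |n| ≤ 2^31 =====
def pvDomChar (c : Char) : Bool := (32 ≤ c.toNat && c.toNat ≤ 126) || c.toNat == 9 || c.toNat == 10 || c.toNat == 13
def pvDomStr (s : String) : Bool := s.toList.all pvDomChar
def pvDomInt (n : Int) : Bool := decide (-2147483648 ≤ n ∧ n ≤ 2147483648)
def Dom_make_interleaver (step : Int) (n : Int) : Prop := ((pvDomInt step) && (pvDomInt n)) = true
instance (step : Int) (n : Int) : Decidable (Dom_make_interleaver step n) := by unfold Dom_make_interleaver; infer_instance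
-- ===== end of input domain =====

-- B builds the permutation with an explicit loop threading a running accumulator acc = (acc + step) % n
-- instead of A's per-element multiplication (i * step) % n; same ValueError guard; equal cost.

-- termination fact for the Euclid loop (needed by the port's recursion)
lemma pvModNatAbsLt (a b : Int) (hb : b ≠ 0) : (PySem.Int.mod a b).natAbs < b.natAbs := by
  rcases lt_or_gt_of_ne hb with h | h
  · have h1 := PySem.Int.mod_neg_bounds (a := a) h
    omega
  · have h1 := PySem.Int.mod_nonneg (a := a) h
    have h2 := PySem.Int.mod_lt (a := a) h
    omega

-- the locally defined gcd helper shared verbatim by both Pythons: while b: a, b = b, a % b; return a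
def pyGcd (a b : Int) : Int :=
  if hb : b = 0 then a else pyGcd b (PySem.Int.mod a b)
termination_by b.natAbs
decreasing_by exact pvModNatAbsLt a b hb

-- ===== PORT A =====
def make_interleaver (step : Int) (n : Int) : List Int :=
  if pyGcd step n ≠ 1 then []  -- raise ValueError: excluded by Pre_
  else (PySem.List.pyRange 0 n 1).map (fun i => PySem.Int.mod (i * step) n)

-- ===== PORT B =====
-- for _ in range(m): result.append(acc); acc = (acc + step) % n
def altLoop (step n : Int) : Nat → Int → List Int
  | 0, _ => []
  | m + 1, acc => acc :: altLoop step n m (PySem.Int.mod (acc + step) n)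

def make_interleaver_alt (step : Int) (n : Int) : List Int :=
  match pyGcd step n with
  | 1 => altLoop step n n.toNat 0
  | _ => []  -- raise ValueError: excluded by Pre_

-- ===== PRECONDITION & SPEC =====
-- Pre_: exactly where A's coprimality guard passes (the Python gcd returns sign(n)*gcd for n ≠ 0
-- and step for n = 0, so it equals 1 iff n > 0 with gcd(step,n) = 1, or n = 0 with step = 1).
def Pre_make_interleaver (step : Int) (n : Int) : Prop :=
  (0 < n ∧ Int.gcd step n = 1) ∨ (n = 0 ∧ step = 1)
instance (step : Int) (n : Int) : Decidable (Pre_make_interleaver step n) := by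
  unfold Pre_make_interleaver; infer_instance

def pvWitness_make_interleaver : Int × Int := (37, 121)

def Spec_make_interleaver (step : Int) (n : Int) (out : List Int) : Prop := out = make_interleaver_alt step n
instance (step : Int) (n : Int) (out : List Int) : Decidable (Spec_make_interleaver step n out) := by
  unfold Spec_make_interleaver; infer_instance

-- ===== CLAIM (what is proved, stated in full; the proofs are below) =====
def Claim_equal_make_interleaver : Prop := ∀ (step : Int) (n : Int), Dom_make_interleaver step n → Pre_make_interleaver step n → Spec_make_interleaver step n (make_interleaver step n)

-- ===== LEMMAS AND PROOFS =====

-- the Python Euclid loop computes the mathematical gcd when the second argument starts nonnegative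
theorem pyGcd_eq (a b : Int) (hb : 0 ≤ b) (hab : 0 < b ∨ 0 < a) : pyGcd a b = Int.gcd a b := by
  by_cases h : b = 0
  · subst h
    rw [pyGcd, dif_pos rfl, Int.gcd_zero_right]
    omega
  · have hbpos : 0 < b := lt_of_le_of_ne hb (Ne.symm h)
    rw [pyGcd, dif_neg h,
      pyGcd_eq b (PySem.Int.mod a b) (PySem.Int.mod_nonneg (a := a) hbpos) (Or.inr hbpos),
      PySem.Int.mod_eq_emod_of_pos (a := a) hbpos]
    rw [Int.emod_def, Int.gcd_comm a b]
    simpa using Int.gcd_sub_mul_left_right b a (a / b)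
termination_by b.natAbs
decreasing_by exact pvModNatAbsLt a b h

-- the accumulator after k steps is (k*step) % n
lemma altLoop_eq (step n : Int) (hn : 0 < n) :
    ∀ (m : Nat) (k : Int),
      altLoop step n m (PySem.Int.mod (k * step) n) =
        (List.range m).map (fun (j : Nat) => PySem.Int.mod ((k + (j : Int)) * step) n) := by
  intro m
  induction m with
  | zero => intro k; simp [altLoop]
  | succ m ih =>
    intro k
    have key : PySem.Int.mod (PySem.Int.mod (k * step) n + step) n
        = PySem.Int.mod ((k + 1) * step) n := by
      simp only [PySem.Int.mod_eq_emod_of_pos hn]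
      rw [Int.emod_add_emod]
      ring_nf
    rw [List.range_succ_eq_map, List.map_cons, List.map_map]
    show altLoop step n (m + 1) (PySem.Int.mod (k * step) n) = _
    rw [altLoop, key, ih (k + 1)]
    congr 1
    · push_cast; ring_nf
    · apply List.map_congr_left
      intro x _
      simp only [Function.comp]
      push_cast
      ring_nf

-- ===== VERDICT (by name: the statement is the Claim_ definition above) =====
theorem make_interleaver_spec : Claim_equal_make_interleaver := by
  intro step n _ hpre
  unfold Spec_make_interleaver make_interleaver make_interleaver_alt
  rcases hpre with ⟨hn, hg⟩ | ⟨hn0, hs⟩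
  · have hg1 : pyGcd step n = 1 := by
      rw [pyGcd_eq step n hn.le (Or.inl hn), hg]; rfl
    rw [hg1]
    simp only [ne_eq, not_true_eq_false, if_false]
    have h0 : altLoop step n n.toNat 0
        = altLoop step n n.toNat (PySem.Int.mod (0 * step) n) := by
      simp [PySem.Int.mod_eq_emod_of_pos hn]
    rw [h0, altLoop_eq step n hn n.toNat 0, PySem.List.pyRange_one, List.map_map]
    simp only [sub_zero]
    apply List.map_congr_left
    intro x _
    simp
  · subst hn0; subst hs
    have hg1 : pyGcd 1 0 = 1 := by rw [pyGcd]; simp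
    rw [hg1]
    simp [PySem.List.pyRange_one_eq_nil le_rfl, altLoop]
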